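-- pv_equiv track=rewrite | github.com/daniel-reich/ubiquitous-fiesta | Azhkq898ZtmfyCGif_0.py | numbers_to_ranges
-- ===== SOURCE A (Python) =====
-- def numbers_to_ranges(lst):
--   if not lst: return []
--   fst = lst.pop(0)
--   curr = fst
--   if not lst or curr+1 != lst[0]:
--     return [str(fst)] + numbers_to_ranges(lst)
--   while lst and curr+1 == lst[0]:
--     curr = lst.pop(0)
--   return ["{}-{}".format(fst,curr)] + numbers_to_ranges(lst)
-- ===== SOURCE B (Python) =====
-- def numbers_to_ranges(lst):
--     res = []
--     start = prev = None
--     for x in lst: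
--         if prev is not None and x == prev + 1:
--             prev = x
--         else:
--             if prev is not None:
--                 res.append(str(start) if start == prev else "{}-{}".format(start, prev))
--             start = prev = x
--     if prev is not None:
--         res.append(str(start) if start == prev else "{}-{}".format(start, prev))
--     return res
-- ===== Notes on version B (the rewrite author's own statement) =====
-- stated objective: faster
-- what changed: Replaced A's recursion that repeatedly pops the front of the list (each pop(0) is O(n)) and concatenates result lists with a single linear accumulator pass tracking the start and previous element of the current run; B also leaves the input list unmutated where A empties it.
import Mathlib
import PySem

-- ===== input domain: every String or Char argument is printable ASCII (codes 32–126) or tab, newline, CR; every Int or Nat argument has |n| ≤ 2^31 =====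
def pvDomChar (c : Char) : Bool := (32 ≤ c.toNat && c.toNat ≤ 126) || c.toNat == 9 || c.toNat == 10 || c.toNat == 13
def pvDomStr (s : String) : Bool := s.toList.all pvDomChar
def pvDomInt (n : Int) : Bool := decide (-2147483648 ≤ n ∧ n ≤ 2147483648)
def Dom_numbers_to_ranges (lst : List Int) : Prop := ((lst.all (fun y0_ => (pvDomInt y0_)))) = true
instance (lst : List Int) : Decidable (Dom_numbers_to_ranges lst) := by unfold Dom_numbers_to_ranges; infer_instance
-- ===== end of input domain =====

-- B replaces A's pop(0)-and-recurse scheme by one linear accumulator pass (objective: faster).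
-- Equivalence is about the RETURN value only: Python A empties the input list in place, B does not mutate it.

-- ===== PORT A =====
-- the while loop 'while lst and curr+1 == lst[0]: curr = lst.pop(0)'
def pvConsume (curr : Int) : List Int → Int × List Int
  | [] => (curr, [])
  | x :: xs => if curr + 1 = x then pvConsume x xs else (curr, x :: xs)

theorem pvConsume_len (curr : Int) (l : List Int) : (pvConsume curr l).2.length ≤ l.length := by
  induction l generalizing curr with
  | nil => simp [pvConsume]
  | cons x xs ih =>
    simp only [pvConsume]
    split
    · exact le_trans (ih x) (Nat.le_succ _)
    · simp

def numbers_to_ranges (lst : List Int) : List String :=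
  match lst with
  | [] => []
  | fst :: rest =>
    if rest = [] ∨ ¬ (rest.head? = some (fst + 1)) then
      [PySem.Int.toStr fst] ++ numbers_to_ranges rest
    else
      [PySem.Int.toStr fst ++ "-" ++ PySem.Int.toStr (pvConsume fst rest).1] ++ numbers_to_ranges (pvConsume fst rest).2
  termination_by lst.length
  decreasing_by
  · simp
  · simpa using Nat.lt_succ_of_le (pvConsume_len fst rest)

-- ===== PORT B =====
-- 'res.append(str(start) if start == prev else "{}-{}".format(start, prev))'
def pvEmit (start prev : Int) : String :=
  if start = prev then PySem.Int.toStr start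
  else PySem.Int.toStr start ++ "-" ++ PySem.Int.toStr prev

-- loop body; state = (res, Option (start, prev))
def pvStepB (st : List String × Option (Int × Int)) (x : Int) : List String × Option (Int × Int) :=
  match st.2 with
  | some (s, p) =>
    if x = p + 1 then (st.1, some (s, x))
    else (st.1 ++ [pvEmit s p], some (x, x))
  | none => (st.1, some (x, x))

-- final flush after the loop
def pvFinishB (st : List String × Option (Int × Int)) : List String :=
  match st.2 with
  | some (s, p) => st.1 ++ [pvEmit s p]
  | none => st.1

def numbers_to_ranges_alt (lst : List Int) : List String :=
  pvFinishB (lst.foldl pvStepB ([], none))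

-- ===== PRECONDITION & SPEC =====
def Spec_numbers_to_ranges (lst : List Int) (out : List String) : Prop := out = numbers_to_ranges_alt lst
instance (lst : List Int) (out : List String) : Decidable (Spec_numbers_to_ranges lst out) := by unfold Spec_numbers_to_ranges; infer_instance

-- ===== CLAIM =====
def Claim_equal_numbers_to_ranges : Prop := ∀ (lst : List Int), Dom_numbers_to_ranges lst → Spec_numbers_to_ranges lst (numbers_to_ranges lst)

-- ===== LEMMAS AND PROOFS =====

-- the fold only appends to the accumulator
theorem pvFold_shift (l : List Int) (acc : List String) (st : Option (Int × Int)) :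
    l.foldl pvStepB (acc, st) = ((acc ++ (l.foldl pvStepB ([], st)).1, (l.foldl pvStepB ([], st)).2)) := by
  induction l generalizing acc st with
  | nil => simp
  | cons x xs ih =>
    simp only [List.foldl_cons]
    cases st with
    | none => simp [pvStepB]; rw [ih]
    | some sp =>
      obtain ⟨s, p⟩ := sp
      by_cases h : x = p + 1
      · simp [pvStepB, h]; rw [ih]
      · simp only [pvStepB, if_neg h]
        rw [ih, ih ([] ++ [pvEmit s p])]
        simp

theorem pvConsume_ge (l : List Int) (p : Int) : p ≤ (pvConsume p l).1 := by
  induction l generalizing p with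
  | nil => simp [pvConsume]
  | cons x xs ih =>
    simp only [pvConsume]
    split
    · rename_i h
      exact le_trans (by omega : p ≤ x) (ih x)
    · simp

-- run lemma: folding from an open run (s,p) emits exactly the run A's while loop would close
theorem pvFold_run (l : List Int) (s p : Int) :
    pvFinishB (l.foldl pvStepB ([], some (s, p))) =
      pvEmit s (pvConsume p l).1 :: pvFinishB ((pvConsume p l).2.foldl pvStepB ([], none)) := by
  induction l generalizing p with
  | nil => simp [pvConsume, pvFinishB, List.foldl]
  | cons x xs ih =>
    by_cases h : p + 1 = x
    · have hx : x = p + 1 := h.symm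
      simp only [List.foldl_cons, pvStepB, if_pos hx, pvConsume, if_pos h]
      exact ih x
    · have hx : ¬ x = p + 1 := fun hc => h hc.symm
      simp only [List.foldl_cons, pvStepB, if_neg hx, pvConsume, if_neg h]
      rw [pvFold_shift]
      simp only [pvFinishB]
      cases hst : (xs.foldl pvStepB ([], some (x, x))).2 with
      | none => simp
      | some sp => simp

theorem pv_main (n : ℕ) : ∀ (lst : List Int), lst.length ≤ n → numbers_to_ranges lst = numbers_to_ranges_alt lst := by
  induction n with
  | zero =>
    intro lst h
    have : lst = [] := List.eq_nil_of_length_eq_zero (Nat.le_zero.mp h)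
    subst this
    simp [numbers_to_ranges, numbers_to_ranges_alt, pvFinishB]
  | succ n ih =>
    intro lst h
    match lst with
    | [] => simp [numbers_to_ranges, numbers_to_ranges_alt, pvFinishB]
    | fst :: rest =>
      have hlen : rest.length ≤ n := by simpa using h
      have hBcons : numbers_to_ranges_alt (fst :: rest) =
          pvFinishB (rest.foldl pvStepB ([], some (fst, fst))) := by
        simp [numbers_to_ranges_alt, pvStepB]
      by_cases hc : rest = [] ∨ ¬ (rest.head? = some (fst + 1))
      · -- singleton branch: consume would not fire
        have hcons : pvConsume fst rest = (fst, rest) := by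
          cases rest with
          | nil => simp [pvConsume]
          | cons y ys =>
            rcases hc with hc | hc
            · exact absurd hc (by simp)
            · have : ¬ fst + 1 = y := by
                intro hc2; exact hc (by simp [hc2])
              simp [pvConsume, this]
        rw [numbers_to_ranges, if_pos hc, hBcons, pvFold_run, hcons]
        simp only [pvEmit, reduceIte]
        rw [ih rest hlen]
        simp [numbers_to_ranges_alt]
      · -- run branch
        rw [not_or, not_not] at hc
        obtain ⟨hne, hhd⟩ := hc
        rw [numbers_to_ranges, if_neg (by simp [hne, hhd])]
        rw [hBcons, pvFold_run]
        obtain ⟨y, ys, rfl⟩ := List.exists_cons_of_ne_nil hne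
        have hy : fst + 1 = y := by have := hhd; simp at this; omega
        have hconsum : pvConsume fst (y :: ys) = pvConsume y ys := by
          simp [pvConsume, hy]
        have hgt : fst < (pvConsume fst (y :: ys)).1 := by
          rw [hconsum]
          have := pvConsume_ge ys y
          omega
        have hne2 : ¬ fst = (pvConsume fst (y :: ys)).1 := by omega
        have hlen2 : (pvConsume fst (y :: ys)).2.length ≤ n :=
          le_trans (pvConsume_len fst (y :: ys)) (by simpa using h)
        rw [ih _ hlen2]
        simp [pvEmit, hne2, numbers_to_ranges_alt]

-- ===== VERDICT =====
theorem numbers_to_ranges_spec : Claim_equal_numbers_to_ranges := by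
  intro lst _
  unfold Spec_numbers_to_ranges
  exact pv_main lst.length lst le_rfl
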